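-- pv_equiv track=rewrite | github.com/ET0024/AtCoder | ABC195/D.py | calc
-- ===== SOURCE A (Python) =====
-- def calc(w, v, x):
--     zipped = zip(v, w)
--     zipped = sorted(zipped)
--     v, w = map(list, zip(*zipped))
--     x.sort()
--
--     total = 0
--     x_used_flag = [False] * len(x)
--     while len(v):
--         _v = v.pop()
--         _w = w.pop()
--
--         for i, _x in enumerate(x):
--             if x_used_flag[i] is False and _x >= _w:
--                 total += _v
--                 x_used_flag[i] = True
--                 break
--
--     return total
-- ===== SOURCE B (Python) =====
-- def calc(w, v, x):
--     # Note: like the original, this sorts x in place; return-value equivalent.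
--     items = sorted(zip(v, w))
--     x.sort()
--     boxes = list(x)
--     total = 0
--     for _v, _w in reversed(items):
--         lo = 0
--         hi = len(boxes)
--         while lo < hi:
--             mid = (lo + hi) // 2
--             if boxes[mid] < _w:
--                 lo = mid + 1
--             else:
--                 hi = mid
--         if lo < len(boxes):
--             total += _v
--             boxes.pop(lo)
--     return total
-- ===== Notes on version B (the rewrite author's own statement) =====
-- stated objective: faster
-- what changed: Replaces the per-item linear scan over a used-flags array with a shrinking sorted box list queried by hand-written binary search (smallest fitting box found in O(log m) and removed), iterating the value-sorted items directly instead of unzipping and popping parallel lists.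
import Mathlib
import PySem

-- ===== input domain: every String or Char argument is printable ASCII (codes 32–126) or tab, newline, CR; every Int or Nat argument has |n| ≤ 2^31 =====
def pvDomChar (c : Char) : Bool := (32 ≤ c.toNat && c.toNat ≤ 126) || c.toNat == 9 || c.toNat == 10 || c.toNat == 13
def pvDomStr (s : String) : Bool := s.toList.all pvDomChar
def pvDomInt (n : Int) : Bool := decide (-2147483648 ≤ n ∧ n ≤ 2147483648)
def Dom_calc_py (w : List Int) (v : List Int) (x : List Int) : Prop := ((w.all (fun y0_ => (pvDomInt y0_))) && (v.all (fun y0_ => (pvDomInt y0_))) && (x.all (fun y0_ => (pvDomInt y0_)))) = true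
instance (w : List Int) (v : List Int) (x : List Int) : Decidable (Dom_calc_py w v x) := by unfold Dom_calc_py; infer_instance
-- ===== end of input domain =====

-- B replaces A's per-item linear scan over a used-flags array by a shrinking sorted
-- box list with hand-written binary search (faster); both Pythons sort x in place,
-- the equivalence proved is about the return value.

-- ===== PORT A =====
-- inner 'for i, _x in enumerate(x): if x_used_flag[i] is False and _x >= _w: … x_used_flag[i] = True; break'
-- (structural over x/flags in parallel; returns the updated flag list, none = no break taken)
def calcA_find (x : List Int) (flags : List Bool) (wgt : Int) : Option (List Bool) :=
  match x, flags with
  | _x :: xr, f :: fr =>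
      if f = false ∧ wgt ≤ _x then some (true :: fr)
      else (calcA_find xr fr wgt).map (f :: ·)
  | _, _ => none

-- 'while len(v): _v = v.pop(); _w = w.pop(); …' — pop from the end = structural recursion
-- over the reversed lists (v and w always have equal length at the call site)
def calcA_loop (vr : List Int) (wr : List Int) (x : List Int) (flags : List Bool) (total : Int) : Int :=
  match vr, wr with
  | _v :: vrest, _w :: wrest =>
      match calcA_find x flags _w with
      | some flags' => calcA_loop vrest wrest x flags' (total + _v)
      | none => calcA_loop vrest wrest x flags total
  | _, _ => total

def calc_py (w : List Int) (v : List Int) (x : List Int) : Int :=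
  let zipped := PySem.List.sorted2 (v.zip w) Prod.fst Prod.snd
  let v' := zipped.map Prod.fst
  let w' := zipped.map Prod.snd
  let xs := PySem.List.sorted x (fun a => a)
  calcA_loop v'.reverse w'.reverse xs (List.replicate xs.length false) 0

-- ===== PORT B =====
-- 'while lo < hi: mid = (lo+hi)//2; …' — boxes[mid] is always in range (mid < hi ≤ len),
-- so List.getD is exact here; the loop runs at most hi - lo times, so recursion on that
-- fuel is the same computation made structurally total
def calcB_searchGo (boxes : List Int) (wgt : Int) : Nat → Nat → Nat → Nat
  | 0, lo, _hi => lo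
  | fuel + 1, lo, hi =>
      if lo < hi then
        let mid := (lo + hi) / 2
        if boxes.getD mid 0 < wgt then calcB_searchGo boxes wgt fuel (mid + 1) hi
        else calcB_searchGo boxes wgt fuel lo mid
      else lo

def calcB_search (boxes : List Int) (wgt : Int) (lo hi : Nat) : Nat :=
  calcB_searchGo boxes wgt (hi - lo) lo hi

-- 'for _v, _w in reversed(items): …'; boxes.pop(lo) with lo < len(boxes) = eraseIdx (exact in range)
def calcB_loop (items : List (Int × Int)) (boxes : List Int) (total : Int) : Int :=
  match items with
  | [] => total
  | (pv, pw) :: rest =>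
      let lo := calcB_search boxes pw 0 boxes.length
      if lo < boxes.length then calcB_loop rest (boxes.eraseIdx lo) (total + pv)
      else calcB_loop rest boxes total

def calc_py_alt (w : List Int) (v : List Int) (x : List Int) : Int :=
  let items := PySem.List.sorted2 (v.zip w) Prod.fst Prod.snd
  let boxes := PySem.List.sorted x (fun a => a)
  calcB_loop items.reverse boxes 0

-- ===== PRECONDITION & SPEC =====
-- A raises ValueError ('v, w = map(list, zip(*zipped))' on an empty zipped) when v or w is empty.
def Pre_calc_py (w : List Int) (v : List Int) (x : List Int) : Prop := v ≠ [] ∧ w ≠ []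
instance (w : List Int) (v : List Int) (x : List Int) : Decidable (Pre_calc_py w v x) := by unfold Pre_calc_py; infer_instance
def pvWitness_calc_py : List Int × List Int × List Int := ([2, 3], [5, 1], [4])

def Spec_calc_py (w : List Int) (v : List Int) (x : List Int) (out : Int) : Prop := out = calc_py_alt w v x
instance (w : List Int) (v : List Int) (x : List Int) (out : Int) : Decidable (Spec_calc_py w v x out) := by unfold Spec_calc_py; infer_instance

-- ===== CLAIM (what is proved, stated in full; the proofs are below) =====
def Claim_equal_calc_py : Prop := ∀ (w : List Int) (v : List Int) (x : List Int), Dom_calc_py w v x → Pre_calc_py w v x → Spec_calc_py w v x (calc_py w v x)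
-- ===== LEMMAS AND PROOFS =====

-- the multiset of boxes A has not used yet, in index (= sorted) order
def unusedL : List Int → List Bool → List Int
  | a :: xs, f :: fs => if f then unusedL xs fs else a :: unusedL xs fs
  | _, _ => []

-- remove the first element ≥ wgt (if any)
def rmF (wgt : Int) : List Int → List Int
  | [] => []
  | b :: bs => if wgt ≤ b then bs else b :: rmF wgt bs

theorem unusedL_replicate (xs : List Int) : unusedL xs (List.replicate xs.length false) = xs := by
  induction xs with
  | nil => rfl
  | cons a t ih => simp [unusedL, List.replicate, ih]

theorem rmF_sublist (wgt : Int) (l : List Int) : (rmF wgt l).Sublist l := by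
  induction l with
  | nil => simp [rmF]
  | cons b bs ih =>
      by_cases h : wgt ≤ b
      · simp [rmF, h]
      · simpa [rmF, h] using ih.cons₂ b

theorem calcA_find_none (x : List Int) (flags : List Bool) (wgt : Int)
    (h : calcA_find x flags wgt = none) : ∀ b ∈ unusedL x flags, b < wgt := by
  induction x generalizing flags with
  | nil => intro b hb; cases flags <;> simp [unusedL] at hb
  | cons a xr ih =>
      cases flags with
      | nil => intro b hb; simp [unusedL] at hb
      | cons f fr =>
          cases f with
          | true =>
              simp [calcA_find] at h
              intro b hb
              simp [unusedL] at hb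
              exact ih fr h b hb
          | false =>
              by_cases hle : wgt ≤ a
              · simp [calcA_find, hle] at h
              · simp [calcA_find, hle] at h
                intro b hb
                simp [unusedL] at hb
                rcases hb with rfl | hb
                · omega
                · exact ih fr h b hb
theorem calcA_find_some (x : List Int) (flags : List Bool) (wgt : Int) (flags' : List Bool)
    (h : calcA_find x flags wgt = some flags') :
    unusedL x flags' = rmF wgt (unusedL x flags) ∧ (∃ b ∈ unusedL x flags, wgt ≤ b) := by
  induction x generalizing flags flags' with
  | nil => cases flags <;> simp [calcA_find] at h
  | cons a xr ih =>
      cases flags with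
      | nil => simp [calcA_find] at h
      | cons f fr =>
          cases f with
          | true =>
              simp [calcA_find] at h
              obtain ⟨fl, hfl, rfl⟩ := h
              obtain ⟨h1, b, hb, hble⟩ := ih fr fl hfl
              exact ⟨by simpa [unusedL] using h1, b, by simpa [unusedL] using hb, hble⟩
          | false =>
              by_cases hle : wgt ≤ a
              · simp [calcA_find, hle] at h
                subst h
                refine ⟨?_, a, by simp [unusedL], hle⟩
                simp [unusedL, rmF, hle]
              · simp [calcA_find, hle] at h
                obtain ⟨fl, hfl, rfl⟩ := h
                obtain ⟨h1, b, hb, hble⟩ := ih fr fl hfl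
                refine ⟨?_, b, by simp [unusedL, hb], hble⟩
                simp [unusedL, rmF, hle, h1]

-- binary-search invariant
theorem calcB_searchGo_inv (boxes : List Int) (wgt : Int)
    (hs : boxes.Pairwise (· ≤ ·)) :
    ∀ fuel lo hi, hi - lo ≤ fuel → lo ≤ hi → hi ≤ boxes.length →
    (∀ i, i < lo → boxes.getD i 0 < wgt) →
    (∀ i, hi ≤ i → i < boxes.length → wgt ≤ boxes.getD i 0) →
    (calcB_searchGo boxes wgt fuel lo hi ≤ boxes.length ∧
      (∀ i, i < calcB_searchGo boxes wgt fuel lo hi → boxes.getD i 0 < wgt) ∧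
      (calcB_searchGo boxes wgt fuel lo hi < boxes.length →
        wgt ≤ boxes.getD (calcB_searchGo boxes wgt fuel lo hi) 0)) := by
  have hmono : ∀ i j, i ≤ j → j < boxes.length → boxes.getD i 0 ≤ boxes.getD j 0 := by
    intro i j hij hj
    rcases Nat.eq_or_lt_of_le hij with rfl | hlt
    · exact le_refl _
    · have hi : i < boxes.length := Nat.lt_of_lt_of_le hlt (Nat.le_of_lt hj)
      rw [List.getD_eq_getElem _ _ hi, List.getD_eq_getElem _ _ hj]
      exact (List.pairwise_iff_getElem.mp hs) i j hi hj hlt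
  intro fuel
  induction fuel with
  | zero =>
      intro lo hi hfuel hlohi hhilen hlow hhigh
      have : lo = hi := by omega
      subst this
      exact ⟨hhilen, hlow, fun h => hhigh lo (le_refl _) h⟩
  | succ fuel ih =>
      intro lo hi hfuel hlohi hhilen hlow hhigh
      rw [calcB_searchGo]
      by_cases hlt : lo < hi
      · simp only [if_pos hlt]
        set mid := (lo + hi) / 2 with hmid
        have hm1 : lo ≤ mid := by omega
        have hm2 : mid < hi := by omega
        by_cases hb : boxes.getD mid 0 < wgt
        · simp only [if_pos hb]
          exact ih (mid + 1) hi (by omega) (by omega) hhilen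
            (fun i hi2 => lt_of_le_of_lt (hmono i mid (by omega) (by omega)) hb) hhigh
        · simp only [if_neg hb]
          exact ih lo mid (by omega) hm1 (by omega) hlow
            (fun i hmi hilen => le_trans (not_lt.mp hb) (hmono mid i hmi hilen))
      · simp only [if_neg hlt]
        have : lo = hi := by omega
        subst this
        exact ⟨hhilen, hlow, fun h => hhigh lo (le_refl _) h⟩

theorem calcB_search_inv (boxes : List Int) (wgt : Int)
    (hs : boxes.Pairwise (· ≤ ·)) :
    (calcB_search boxes wgt 0 boxes.length ≤ boxes.length ∧
      (∀ i, i < calcB_search boxes wgt 0 boxes.length → boxes.getD i 0 < wgt) ∧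
      (calcB_search boxes wgt 0 boxes.length < boxes.length →
        wgt ≤ boxes.getD (calcB_search boxes wgt 0 boxes.length) 0)) :=
  calcB_searchGo_inv boxes wgt hs (boxes.length - 0) 0 boxes.length (le_refl _)
    (Nat.zero_le _) (le_refl _) (by omega) (fun i h1 h2 => by omega)

theorem rmF_eq_eraseIdx (boxes : List Int) (wgt : Int) (r : Nat)
    (hr : r < boxes.length)
    (hlow : ∀ i, i < r → boxes.getD i 0 < wgt)
    (hhit : wgt ≤ boxes.getD r 0) :
    rmF wgt boxes = boxes.eraseIdx r := by
  induction boxes generalizing r with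
  | nil => simp at hr
  | cons b bs ih =>
      cases r with
      | zero =>
          simp only [List.getD_cons_zero] at hhit
          simp [rmF, hhit, List.eraseIdx]
      | succ r' =>
          have h0 : b < wgt := by simpa using hlow 0 (Nat.succ_pos _)
          simp only [rmF, if_neg (not_le.mpr h0), List.eraseIdx]
          exact congrArg (b :: ·) (ih r' (by simpa using hr)
            (fun i hi => by simpa using hlow (i + 1) (by omega))
            (by simpa using hhit))

-- the main loop invariant: A's unused boxes equal B's remaining (sorted) box list
theorem loop_eq (zr : List (Int × Int)) :
    ∀ (xs : List Int) (flags : List Bool) (boxes : List Int) (total : Int),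
    unusedL xs flags = boxes → boxes.Pairwise (· ≤ ·) →
    calcA_loop (zr.map Prod.fst) (zr.map Prod.snd) xs flags total = calcB_loop zr boxes total := by
  induction zr with
  | nil => intro xs flags boxes total _ _; rfl
  | cons p rest ih =>
      obtain ⟨pv, pw⟩ := p
      intro xs flags boxes total hu hs
      simp only [List.map_cons, calcA_loop, calcB_loop]
      obtain ⟨hle, hlow, hhit⟩ := calcB_search_inv boxes pw hs
      set r := calcB_search boxes pw 0 boxes.length with hrdef
      cases hfind : calcA_find xs flags pw with
      | none =>
          have hall : ∀ b ∈ unusedL xs flags, b < pw := calcA_find_none xs flags pw hfind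
          rw [hu] at hall
          have hnr : ¬ r < boxes.length := by
            intro hlt
            exact absurd (hhit hlt) (not_le.mpr (hall _ (by rw [List.getD_eq_getElem _ _ hlt]; exact List.getElem_mem hlt)))
          rw [if_neg hnr]
          exact ih xs flags boxes total hu hs
      | some flags' =>
          obtain ⟨hu', b, hb, hble⟩ := calcA_find_some xs flags pw flags' hfind
          rw [hu] at hb
          have hr : r < boxes.length := by
            by_contra hnr
            have : ∀ i, i < boxes.length → boxes.getD i 0 < pw :=
              fun i hi => hlow i (by omega)
            obtain ⟨j, hj, rfl⟩ := List.getElem_of_mem hb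
            have := this j hj
            rw [List.getD_eq_getElem _ _ hj] at this
            omega
          rw [if_pos hr]
          have herase : rmF pw boxes = boxes.eraseIdx r :=
            rmF_eq_eraseIdx boxes pw r hr hlow (hhit hr)
          have hu'' : unusedL xs flags' = boxes.eraseIdx r := by
            rw [hu', hu, herase]
          have hs' : (boxes.eraseIdx r).Pairwise (· ≤ ·) := by
            rw [← herase]
            exact List.Pairwise.sublist (rmF_sublist pw boxes) hs
          exact ih xs flags' (boxes.eraseIdx r) (total + pv) hu'' hs'

-- ===== VERDICT (by name: the statement is the Claim_ definition above) =====
theorem calc_py_spec : Claim_equal_calc_py := by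
  intro w v x _ _
  show calcA_loop ((PySem.List.sorted2 (v.zip w) Prod.fst Prod.snd).map Prod.fst).reverse
      ((PySem.List.sorted2 (v.zip w) Prod.fst Prod.snd).map Prod.snd).reverse
      (PySem.List.sorted x (fun a => a))
      (List.replicate (PySem.List.sorted x (fun a => a)).length false) 0
    = calcB_loop (PySem.List.sorted2 (v.zip w) Prod.fst Prod.snd).reverse
      (PySem.List.sorted x (fun a => a)) 0
  rw [← List.map_reverse, ← List.map_reverse]
  exact loop_eq _ _ _ _ 0 (unusedL_replicate _)
    (by simpa using PySem.List.sorted_pairwise x (fun a => a))
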